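-- pv_equiv track=rewrite | github.com/seefish3/CS1410 | dnaSequencing/dnaSequencing.py | findLargestOverlap
-- ===== SOURCE A (Python) =====
-- def strandsAreNotEmpty(strand1, strand2):
--     return len(strand1) > 0 and len(strand2) > 0
--
-- def strandsAreEqualLengths(strand1, strand2):
--     return len(strand1) == len(strand2)
--
-- def candidateOverlapsTarget(target, candidate, overlap):
--     return target[len(target)- overlap:] == candidate[:overlap]
--
-- def findLargestOverlap(target, candidate):
--     largest = 0
--     if strandsAreNotEmpty(target, candidate) == True and strandsAreEqualLengths(target, candidate) == True:
--         for i in range(len(target) + 1 ):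
--                 if candidateOverlapsTarget(target, candidate, i) == True:
--                     largest = i
--         return largest
--     else:
--         return -1
-- ===== SOURCE B (Python) =====
-- def findLargestOverlap(target, candidate):
--     n = len(target)
--     if n == 0 or len(candidate) != n:
--         return -1
--     # single left-to-right pass over target, maintaining the set of active
--     # match lengths l such that the last l processed chars == candidate[:l]
--     active = [0]
--     for ch in target:
--         active = [l + 1 for l in active if l < n and candidate[l] == ch] + [0]
--     return max(active)
-- ===== Notes on version B (the rewrite author's own statement) =====
-- stated objective: alternative
-- what changed: B replaces A's loop over all overlap lengths with one slice comparison each by a single left-to-right pass over target that maintains the set of active match lengths (Aho-Corasick-style), comparing one character of candidate per active length per step and taking the max at the end.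
import Mathlib
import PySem

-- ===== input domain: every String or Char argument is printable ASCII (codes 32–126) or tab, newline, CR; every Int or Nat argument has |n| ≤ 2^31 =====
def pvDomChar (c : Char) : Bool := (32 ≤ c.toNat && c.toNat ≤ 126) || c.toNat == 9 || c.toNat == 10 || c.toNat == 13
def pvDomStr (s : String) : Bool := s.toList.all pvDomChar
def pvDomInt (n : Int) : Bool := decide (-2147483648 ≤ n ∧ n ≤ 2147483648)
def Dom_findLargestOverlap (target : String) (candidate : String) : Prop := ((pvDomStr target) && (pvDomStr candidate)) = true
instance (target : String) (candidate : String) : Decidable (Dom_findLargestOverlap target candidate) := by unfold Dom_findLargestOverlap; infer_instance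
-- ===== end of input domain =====

-- B replaces A's scan over all overlap lengths (one slice comparison per length)
-- by a single left-to-right pass over target that maintains the set of active
-- match lengths, comparing one character at a time (objective: alternative).

-- ===== PORT A =====
def strandsAreNotEmpty (strand1 strand2 : String) : Bool :=
  decide (0 < strand1.toList.length) && decide (0 < strand2.toList.length)

def strandsAreEqualLengths (strand1 strand2 : String) : Bool :=
  decide (strand1.toList.length = strand2.toList.length)

-- target[len(target)-overlap:] == candidate[:overlap], on the char lists (exact for string slicing)
def candidateOverlapsTarget (target candidate : String) (overlap : Int) : Bool :=
  decide (PySem.List.slice target.toList (some ((target.toList.length : Int) - overlap)) none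
          = PySem.List.slice candidate.toList none (some overlap))

def findLargestOverlap (target : String) (candidate : String) : Int :=
  if strandsAreNotEmpty target candidate = true ∧ strandsAreEqualLengths target candidate = true then
    (PySem.List.pyRange 0 ((target.toList.length : Int) + 1) 1).foldl
      (fun largest i => if candidateOverlapsTarget target candidate i = true then i else largest) 0
  else
    -1

-- ===== PORT B =====
-- one step of Source B's loop: [l + 1 for l in active if l < n and candidate[l] == ch] + [0]
-- (lengths are nonnegative throughout, kept as Nat; candidate[l] is guarded by l < n)
def bStep (c : List Char) (n : Nat) (active : List Nat) (ch : Char) : List Nat :=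
  ((active.filter (fun l => decide (l < n) && (c.getD l ' ' == ch))).map (· + 1)) ++ [0]

def findLargestOverlap_alt (target : String) (candidate : String) : Int :=
  let t := target.toList
  let c := candidate.toList
  let n := t.length
  if n = 0 ∨ c.length ≠ n then -1
  else
    -- max(active): left fold of max; exact here since active is a nonempty list of Nat
    (((t.foldl (bStep c n) [0]).foldl max 0 : Nat) : Int)

-- ===== PRECONDITION & SPEC =====
def Spec_findLargestOverlap (target : String) (candidate : String) (out : Int) : Prop := out = findLargestOverlap_alt target candidate
instance (target : String) (candidate : String) (out : Int) : Decidable (Spec_findLargestOverlap target candidate out) := by unfold Spec_findLargestOverlap; infer_instance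

-- ===== CLAIM (what is proved, stated in full; the proofs are below) =====
def Claim_equal_findLargestOverlap : Prop := ∀ (target : String) (candidate : String), Dom_findLargestOverlap target candidate → Spec_findLargestOverlap target candidate (findLargestOverlap target candidate)

-- ===== LEMMAS AND PROOFS =====

-- A's ascending fold up to overlap m computes the greatest ℓ ≤ m whose length-ℓ
-- suffix of target equals the length-ℓ prefix of candidate.
lemma foldA_eq_findGreatest (target candidate : String) (m : Nat)
    (hm : m ≤ target.toList.length) :
    (PySem.List.pyRange 0 ((m : Int) + 1) 1).foldl
      (fun largest i => if candidateOverlapsTarget target candidate i = true then i else largest) 0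
    = ((Nat.findGreatest
        (fun ℓ => target.toList.drop (target.toList.length - ℓ) = candidate.toList.take ℓ) m : Nat) : Int) := by
  induction m with
  | zero =>
      rw [show ((0 : Nat) : Int) + 1 = 0 + 1 by norm_num, PySem.List.pyRange_one_singleton]
      simp only [List.foldl_cons, List.foldl_nil, Nat.findGreatest_zero]
      split <;> rfl
  | succ k ih =>
      have hk : k ≤ target.toList.length := Nat.le_of_succ_le hm
      have hsplit : PySem.List.pyRange 0 ((k : Int) + 1 + 1)
          = PySem.List.pyRange 0 ((k : Int) + 1) ++ [(k : Int) + 1] := by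
        have := PySem.List.pyRange_one_succ_right (a := 0) (b := (k : Int) + 1) (by omega)
        simpa using this
      have hfa : (0 : Int) ≤ (target.toList.length : Int) - ((k : Int) + 1) := by omega
      have hfb : (0 : Int) ≤ (k : Int) + 1 := by omega
      have hcond : candidateOverlapsTarget target candidate ((k : Int) + 1) = true
          ↔ target.toList.drop (target.toList.length - (k + 1)) = candidate.toList.take (k + 1) := by
        unfold candidateOverlapsTarget
        rw [PySem.List.slice_from target.toList hfa, PySem.List.slice_to candidate.toList hfb]
        have h1 : ((target.toList.length : Int) - ((k : Int) + 1)).toNat = target.toList.length - (k + 1) := by omega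
        have h2 : (((k : Int) + 1)).toNat = k + 1 := by omega
        rw [h1, h2]
        simp
      rw [show ((k + 1 : Nat) : Int) + 1 = ((k : Int) + 1 + 1) by push_cast; ring, hsplit,
        List.foldl_append]
      simp only [List.foldl_cons, List.foldl_nil, Nat.findGreatest_succ]
      by_cases h : target.toList.drop (target.toList.length - (k + 1)) = candidate.toList.take (k + 1)
      · rw [if_pos (hcond.mpr h), if_pos h]; push_cast; ring
      · rw [if_neg (fun hc => h (hcond.mp hc)), if_neg h, ih hk]

-- one bStep preserves B's loop invariant: active holds exactly the lengths ℓ with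
-- (processed prefix p).suffix of length ℓ = candidate.take ℓ
lemma mem_bStep {cs p : List Char} {n : Nat} (hcn : cs.length = n) (ch : Char) (acc : List Nat)
    (hacc : ∀ ℓ, ℓ ∈ acc ↔ ℓ ≤ p.length ∧ p.drop (p.length - ℓ) = cs.take ℓ) :
    ∀ ℓ, ℓ ∈ bStep cs n acc ch
      ↔ ℓ ≤ (p ++ [ch]).length ∧ (p ++ [ch]).drop ((p ++ [ch]).length - ℓ) = cs.take ℓ := by
  intro ℓ
  have hlen : (p ++ [ch]).length = p.length + 1 := by simp
  cases ℓ with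
  | zero =>
      simp [bStep]
  | succ k =>
      have hmem : k + 1 ∈ bStep cs n acc ch
          ↔ k ∈ acc ∧ k < n ∧ cs.getD k ' ' = ch := by
        simp only [bStep, List.mem_append, List.mem_map, List.mem_filter,
          Bool.and_eq_true, decide_eq_true_eq, beq_iff_eq, List.mem_singleton]
        constructor
        · rintro (⟨l, ⟨hl, hln, hc⟩, hlk⟩ | h)
          · have : l = k := by omega
            subst this; exact ⟨hl, hln, hc⟩
          · omega
        · rintro ⟨hk, hn, hc⟩
          exact Or.inl ⟨k, ⟨hk, hn, hc⟩, rfl⟩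
      rw [hmem, hacc k, hlen]
      constructor
      · rintro ⟨⟨hkp, hmatch⟩, hkn, hch⟩
        refine ⟨by omega, ?_⟩
        have hd : (p ++ [ch]).drop (p.length + 1 - (k + 1)) = p.drop (p.length - k) ++ [ch] := by
          rw [show p.length + 1 - (k + 1) = p.length - k by omega,
            List.drop_append_of_le_length (by omega)]
        have hkc : k < cs.length := by omega
        have ht : cs.take (k + 1) = cs.take k ++ [cs[k]] := by
          rw [List.take_add_one]
          simp [List.getElem?_eq_getElem hkc]
        have hck : cs[k] = ch := by
          have := List.getD_eq_getElem cs ' ' hkc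
          rw [← hch, ← this]
        rw [hd, ht, hmatch, hck]
      · rintro ⟨hk1, heq⟩
        have hkp : k ≤ p.length := by omega
        have hd : (p ++ [ch]).drop (p.length + 1 - (k + 1)) = p.drop (p.length - k) ++ [ch] := by
          rw [show p.length + 1 - (k + 1) = p.length - k by omega,
            List.drop_append_of_le_length (by omega)]
        rw [hd] at heq
        -- lengths force k < cs.length
        have hlenL : (p.drop (p.length - k) ++ [ch]).length = k + 1 := by
          simp; omega
        have hlenR : (cs.take (k + 1)).length = min (k + 1) cs.length := by simp
        have hkc : k < cs.length := by
          have := congrArg List.length heq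
          rw [hlenL, hlenR] at this
          omega
        have ht : cs.take (k + 1) = cs.take k ++ [cs[k]] := by
          rw [List.take_add_one]
          simp [List.getElem?_eq_getElem hkc]
        rw [ht] at heq
        have hinj := List.append_inj' heq (by simp)
        refine ⟨⟨hkp, hinj.1⟩, by omega, ?_⟩
        have hck : [ch] = [cs[k]] := hinj.2
        have := List.getD_eq_getElem cs ' ' hkc
        simp at hck
        rw [this, hck]

-- the invariant carried through Source B's whole loop
lemma foldl_bStep_inv {cs : List Char} {n : Nat} (hcn : cs.length = n) :
    ∀ (r p : List Char) (acc : List Nat),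
      (∀ ℓ, ℓ ∈ acc ↔ ℓ ≤ p.length ∧ p.drop (p.length - ℓ) = cs.take ℓ) →
      ∀ ℓ, ℓ ∈ r.foldl (bStep cs n) acc
        ↔ ℓ ≤ (p ++ r).length ∧ (p ++ r).drop ((p ++ r).length - ℓ) = cs.take ℓ := by
  intro r
  induction r with
  | nil => intro p acc hacc ℓ; simpa using hacc ℓ
  | cons ch r ih =>
      intro p acc hacc ℓ
      rw [List.append_cons]
      simp only [List.foldl_cons]
      exact ih (p ++ [ch]) (bStep cs n acc ch) (mem_bStep hcn ch acc hacc) ℓ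

-- ===== VERDICT (by name: the statement is the Claim_ definition above) =====
theorem findLargestOverlap_spec : Claim_equal_findLargestOverlap := by
  intro target candidate _
  unfold Spec_findLargestOverlap findLargestOverlap findLargestOverlap_alt
  simp only [strandsAreNotEmpty, strandsAreEqualLengths]
  set t := target.toList with ht
  set c := candidate.toList with hc
  by_cases hA : (0 < t.length ∧ 0 < c.length) ∧ t.length = c.length
  · have hB : ¬ (t.length = 0 ∨ c.length ≠ t.length) := by omega
    rw [if_pos ?_, if_neg hB]
    · -- both sides compute the greatest matching overlap length
      have hcn : c.length = t.length := hA.2.symm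
      have hmem := foldl_bStep_inv hcn t [] [0]
        (by intro ℓ; cases ℓ <;> simp)
      simp only [List.nil_append] at hmem
      set P : Nat → Prop := fun ℓ => t.drop (t.length - ℓ) = c.take ℓ with hP
      have hP0 : P 0 := by simp [hP]
      set g := Nat.findGreatest P t.length with hg
      set active := t.foldl (bStep c t.length) [0] with hact
      have hgoal : active.foldl max 0 = g := by
        have hmax := PySem.List.le_foldl_max active 0
        apply Nat.le_antisymm
        · rcases PySem.List.foldl_max_mem active 0 with h0 | hin
          · rw [h0]; exact Nat.zero_le g
          · have := (hmem _).mp hin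
            exact Nat.le_findGreatest this.1 this.2
        · have hgact : g ∈ active := by
            rw [hmem g]
            exact ⟨Nat.findGreatest_le _, Nat.findGreatest_spec (Nat.zero_le _) hP0⟩
          exact hmax.2 g hgact
      rw [foldA_eq_findGreatest target candidate t.length le_rfl, hgoal]
    · constructor <;> simp only [Bool.and_eq_true, decide_eq_true_eq]
      · exact ⟨hA.1.1, hA.1.2⟩
      · exact hA.2
  · have hB : t.length = 0 ∨ c.length ≠ t.length := by omega
    rw [if_neg ?_, if_pos hB]
    simp only [Bool.and_eq_true, decide_eq_true_eq, not_and]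
    intro h1 h2
    exact absurd ⟨h1, h2⟩ hA
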